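-- pv_equiv track=rewrite | github.com/bengueye345-png/TIQC-internship-week1-Mohamed-Ben-A.O-Gueye | cvs_gpa.py | find_gpa_column
-- ===== SOURCE A (Python) =====
-- from typing import Optional
--
-- POSSIBLE_GPA_HEADERS = {
--     "gpa",
--     "grade_point_average",
--     "gradepointaverage",
--     "grade point average",
--     "grade-point-average",
-- }
--
-- def normalize_header(s: str) -> str:
--     return " ".join(s.strip().lower().replace("-", " ").replace("_", " ").split())
--
-- def find_gpa_column(fieldnames: list[str]) -> Optional[str]:
--     """
--     Returns the actual column name that corresponds to GPA (as it appears in the CSV),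
--     or None if not found.
--     """
--     # direct match after normalization
--     for name in fieldnames:
--         if normalize_header(name) in POSSIBLE_GPA_HEADERS:
--             return name
--
--     # fallback: any header containing 'gpa' after normalization
--     for name in fieldnames:
--         if "gpa" in normalize_header(name):
--             return name
--
--     return None
-- ===== SOURCE B (Python) =====
-- from typing import Optional
--
-- POSSIBLE_GPA_HEADERS = {
--     "gpa",
--     "grade_point_average",
--     "gradepointaverage",
--     "grade point average",
--     "grade-point-average",
-- }
--
-- def normalize_header(s: str) -> str:
--     return " ".join(s.strip().lower().replace("-", " ").replace("_", " ").split())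
--
-- def find_gpa_column(fieldnames: list[str]) -> Optional[str]:
--     # single pass: exact match short-circuits, first containment match kept as fallback
--     fallback = None
--     for name in fieldnames:
--         n = normalize_header(name)
--         if n in POSSIBLE_GPA_HEADERS:
--             return name
--         if fallback is None and "gpa" in n:
--             fallback = name
--     return fallback
-- ===== Notes on version B (the rewrite author's own statement) =====
-- stated objective: alternative
-- what changed: Replaces A's two prioritized passes over fieldnames with a single pass that normalizes each header once and carries the first containment match as a fallback variable, returning immediately on an exact match.
import Mathlib
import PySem

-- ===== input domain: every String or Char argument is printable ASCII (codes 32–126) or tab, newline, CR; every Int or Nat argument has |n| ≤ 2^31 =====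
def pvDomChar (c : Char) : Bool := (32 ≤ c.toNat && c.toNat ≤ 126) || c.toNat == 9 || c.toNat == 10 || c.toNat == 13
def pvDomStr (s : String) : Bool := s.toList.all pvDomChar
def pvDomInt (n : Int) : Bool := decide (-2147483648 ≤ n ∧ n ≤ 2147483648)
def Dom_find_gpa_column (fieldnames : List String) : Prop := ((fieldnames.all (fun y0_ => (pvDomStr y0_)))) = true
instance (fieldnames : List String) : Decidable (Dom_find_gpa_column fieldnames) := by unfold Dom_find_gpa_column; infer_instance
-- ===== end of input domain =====

-- B collapses A's two prioritized passes into one pass carrying the first containment match as fallback state; same return value.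


-- ===== PORT A =====
def POSSIBLE_GPA_HEADERS : PySem.Set String :=
  PySem.Set.ofList ["gpa", "grade_point_average", "gradepointaverage",
                    "grade point average", "grade-point-average"]

def normalize_header (s : String) : String :=
  PySem.Str.join " "
    (PySem.Str.split₀
      (PySem.Str.replace (PySem.Str.replace (PySem.Str.lower (PySem.Str.strip s)) "-" " ") "_" " "))

-- two early-return for-loops, each rendered as List.find?
def find_gpa_column (fieldnames : List String) : Option String :=
  match fieldnames.find? (fun name => PySem.Set.contains POSSIBLE_GPA_HEADERS (normalize_header name)) with
  | some name => some name
  | none => fieldnames.find? (fun name => PySem.Str.isIn "gpa" (normalize_header name))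

-- ===== PORT B =====
-- single loop over fieldnames carrying the fallback as state (Source B's loop)
def fgcLoop (fieldnames : List String) (fallback : Option String) : Option String :=
  match fieldnames with
  | [] => fallback
  | name :: rest =>
    let n := normalize_header name
    if PySem.Set.contains POSSIBLE_GPA_HEADERS n then some name
    else fgcLoop rest (if fallback.isNone && PySem.Str.isIn "gpa" n then some name else fallback)

def find_gpa_column_alt (fieldnames : List String) : Option String :=
  fgcLoop fieldnames none

-- ===== PRECONDITION & SPEC =====
def Spec_find_gpa_column (fieldnames : List String) (out : Option String) : Prop := out = find_gpa_column_alt fieldnames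
instance (fieldnames : List String) (out : Option String) : Decidable (Spec_find_gpa_column fieldnames out) := by unfold Spec_find_gpa_column; infer_instance

-- ===== CLAIM (what is proved, stated in full; the proofs are below) =====
def Claim_equal_find_gpa_column : Prop := ∀ (fieldnames : List String), Dom_find_gpa_column fieldnames → Spec_find_gpa_column fieldnames (find_gpa_column fieldnames)

-- ===== LEMMAS AND PROOFS =====
-- Loop invariant: the one-pass loop with fallback state equals "exact match, else fallback, else containment match".
theorem fgcLoop_eq (fieldnames : List String) (fallback : Option String) :
    fgcLoop fieldnames fallback =
      match fieldnames.find? (fun name => PySem.Set.contains POSSIBLE_GPA_HEADERS (normalize_header name)) with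
      | some name => some name
      | none => fallback.orElse (fun _ =>
          fieldnames.find? (fun name => PySem.Str.isIn "gpa" (normalize_header name))) := by
  induction fieldnames generalizing fallback with
  | nil => cases fallback <;> simp [fgcLoop, Option.orElse]
  | cons name rest ih =>
    simp only [fgcLoop, List.find?]
    cases hp : PySem.Set.contains POSSIBLE_GPA_HEADERS (normalize_header name) with
    | true => simp
    | false =>
      simp only [Bool.false_eq_true, if_false, ih]
      cases hr : rest.find? (fun name => PySem.Set.contains POSSIBLE_GPA_HEADERS (normalize_header name)) <;>
        cases hq : PySem.Str.isIn "gpa" (normalize_header name) <;>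
          cases fallback <;>
            simp [Option.orElse]

-- ===== VERDICT (by name: the statement is the Claim_ definition above) =====
theorem find_gpa_column_spec : Claim_equal_find_gpa_column := by
  intro fieldnames _
  unfold Spec_find_gpa_column find_gpa_column find_gpa_column_alt
  rw [fgcLoop_eq]
  cases fieldnames.find? (fun name => PySem.Set.contains POSSIBLE_GPA_HEADERS (normalize_header name)) <;>
    simp [Option.orElse]
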